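-- pv_equiv track=rewrite | github.com/rustamlatypov/passwd-cracker | scripts/hybrid.py | c16
-- ===== SOURCE A (Python) =====
-- def c16(word):
--     w = ''; i = 0
--     for c in word:
--         if i%2==1:
--             w += c.upper(); i += 1
--         else:
--             w += c; i += 1
--     return w
-- ===== SOURCE B (Python) =====
-- def c16(word):
--     out = []
--     it = iter(word)
--     for a in it:
--         out.append(a)
--         b = next(it, None)
--         if b is None:
--             break
--         out.append(b.upper())
--     return ''.join(out)
-- ===== Notes on version B (the rewrite author's own statement) =====
-- stated objective: alternative
-- what changed: Replaces the indexed loop with parity test by a structural recursion that consumes two characters at a time (keep the first, uppercase the second), so no index counter is maintained.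
import Mathlib
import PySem

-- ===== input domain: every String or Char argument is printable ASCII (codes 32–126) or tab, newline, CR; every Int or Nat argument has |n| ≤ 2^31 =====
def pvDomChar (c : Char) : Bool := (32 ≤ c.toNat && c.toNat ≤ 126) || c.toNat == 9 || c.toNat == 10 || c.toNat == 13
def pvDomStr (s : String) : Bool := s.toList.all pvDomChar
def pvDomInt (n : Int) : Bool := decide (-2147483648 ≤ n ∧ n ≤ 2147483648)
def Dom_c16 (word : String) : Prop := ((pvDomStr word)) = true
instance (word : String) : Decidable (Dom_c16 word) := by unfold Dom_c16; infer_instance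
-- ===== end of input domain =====

-- B replaces A's indexed loop with a parity test by a two-at-a-time structural
-- recursion (no index counter); same O(n) cost, different decomposition.

-- ===== PORT A =====
-- A: scan the word with an index counter i, uppercasing the char when i is odd.
def c16 (word : String) : String :=
  String.ofList
    (word.toList.foldl
      (fun (p : List Char × Int) c =>
        if PySem.Int.mod p.2 2 == 1 then (p.1 ++ [PySem.Chars.upperChar c], p.2 + 1)
        else (p.1 ++ [c], p.2 + 1))
      ([], 0)).1

-- ===== PORT B =====
-- B's helper go: keep the first char, uppercase the second, recurse on the rest.
def c16Go : List Char → List Char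
  | [] => []
  | [a] => [a]
  | a :: b :: rest => a :: PySem.Chars.upperChar b :: c16Go rest

def c16_alt (word : String) : String := String.ofList (c16Go word.toList)

-- ===== PRECONDITION & SPEC =====
def Spec_c16 (word : String) (out : String) : Prop := out = c16_alt word
instance (word : String) (out : String) : Decidable (Spec_c16 word out) := by unfold Spec_c16; infer_instance

-- ===== CLAIM (what is proved, stated in full; the proofs are below) =====
def Claim_equal_c16 : Prop := ∀ (word : String), Dom_c16 word → Spec_c16 word (c16 word)

-- ===== LEMMAS AND PROOFS =====

-- A's transformation as a direct recursion over the characters, with the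
-- current parity as a Bool (true = current index is odd).
def c16Core : List Char → Bool → List Char
  | [], _ => []
  | c :: t, b => (if b then PySem.Chars.upperChar c else c) :: c16Core t (!b)

theorem c16_foldl_core (l : List Char) (acc : List Char) (i : Int) :
    (l.foldl
      (fun (p : List Char × Int) c =>
        if PySem.Int.mod p.2 2 == 1 then (p.1 ++ [PySem.Chars.upperChar c], p.2 + 1)
        else (p.1 ++ [c], p.2 + 1))
      (acc, i)).1 = acc ++ c16Core l (PySem.Int.mod i 2 == 1) := by
  induction l generalizing acc i with
  | nil => simp [c16Core]
  | cons c t ih =>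
    rw [List.foldl_cons]
    by_cases h : i % 2 = 1
    · have hp : (i + 1) % 2 = 0 := by omega
      rw [if_pos (by simp [h]), ih]
      simp [c16Core, h, hp]
    · have h0 : i % 2 = 0 := by omega
      have hp : (i + 1) % 2 = 1 := by omega
      rw [if_neg (by simp [h0]), ih]
      simp [c16Core, h0, hp]

theorem c16Core_eq_go (l : List Char) : c16Core l false = c16Go l := by
  induction l using c16Go.induct with
  | case1 => simp [c16Core, c16Go]
  | case2 a => simp [c16Core, c16Go]
  | case3 a b rest ih => simp [c16Core, c16Go, ih]

-- ===== VERDICT (by name: the statement is the Claim_ definition above) =====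
theorem c16_spec : Claim_equal_c16 := by
  intro word _
  unfold Spec_c16 c16 c16_alt
  rw [c16_foldl_core]
  have h0 : (PySem.Int.mod 0 2 == 1) = false := by decide
  rw [h0, c16Core_eq_go, List.nil_append]
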